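-- pv_equiv track=rewrite | github.com/ChangKe123/CLFA | generate_graph.py | word_to_pos
-- ===== SOURCE A (Python) =====
-- def word_to_pos(text):
-- 	words=text.split(' ')
-- 	filt_words=[]
-- 	pos=[]
-- 	c=0
-- 	for idx, w in enumerate(words):
-- 		for j in range(len(w)):
-- 			pos.append(c)
-- 		if idx!=0:
-- 			pos.append(c)
-- 		if len(w.strip())!=0:
-- 			c+=1
-- 			filt_words.append(w)
--
-- 	assert len(pos)==len(text)
--
-- 	return pos, filt_words
-- ===== SOURCE B (Python) =====
-- def word_to_pos(text):
--     # single character-level scan: no split, no words list; the word index is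
--     # advanced when the space that closes a non-blank word is seen
--     pos = []
--     filt_words = []
--     c = 0
--     buf = []
--     seen = False
--     for ch in text:
--         if ch == ' ':
--             if seen:
--                 c += 1
--                 filt_words.append(''.join(buf))
--             buf = []
--             seen = False
--             pos.append(c)
--         else:
--             pos.append(c)
--             buf.append(ch)
--             if not ch.isspace():
--                 seen = True
--     if seen:
--         filt_words.append(''.join(buf))
--     return pos, filt_words
-- ===== Notes on version B (the rewrite author's own statement) =====
-- stated objective: alternative
-- what changed: Replaces A's split-into-words plus nested per-word loops by a single character-level scan over the raw text that never builds the words list: it streams chars, keeps a running word counter and a current-word buffer, and closes a word when it meets the separating space (or at end of text).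
import Mathlib
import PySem

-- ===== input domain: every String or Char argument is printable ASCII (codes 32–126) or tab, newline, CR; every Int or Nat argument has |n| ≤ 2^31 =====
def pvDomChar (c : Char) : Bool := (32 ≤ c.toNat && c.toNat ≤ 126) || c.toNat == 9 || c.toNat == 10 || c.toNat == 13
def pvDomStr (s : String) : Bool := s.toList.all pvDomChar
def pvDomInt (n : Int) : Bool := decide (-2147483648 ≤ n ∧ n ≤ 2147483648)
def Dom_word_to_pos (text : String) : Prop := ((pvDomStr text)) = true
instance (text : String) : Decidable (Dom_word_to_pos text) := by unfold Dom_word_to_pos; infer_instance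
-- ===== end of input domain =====

-- B replaces A's split-into-words + nested per-word loops by one character-level scan of the
-- raw text (running counter, current-word buffer); objective: alternative algorithm, same cost.

-- ===== PORT A =====
-- A's loop body (pos appends for the chars, the space entry for idx != 0, then the counter/filter update)
def pvAStep (acc : List Int × List String × Int) (iw : Int × String) : List Int × List String × Int :=
  let pos1 := (PySem.List.pyRange 0 (PySem.Str.len iw.2) 1).foldl (fun p _ => p ++ [acc.2.2]) acc.1
  let pos2 := if iw.1 ≠ 0 then pos1 ++ [acc.2.2] else pos1
  if PySem.Str.len (PySem.Str.strip iw.2) ≠ 0 then (pos2, acc.2.1 ++ [iw.2], acc.2.2 + 1)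
  else (pos2, acc.2.1, acc.2.2)

-- port of A; text.split(' '): the separator " " is non-empty so split? is `some` (the `.getD []` branch
-- is never taken); A's trailing `assert len(pos)==len(text)` always succeeds and raises on no input.
def word_to_pos (text : String) : List Int × List String :=
  let words := (PySem.Str.split? text " ").getD []
  let st := (PySem.List.enumerate words).foldl pvAStep ([], [], 0)
  (st.1, st.2.1)

-- ===== PORT B =====
-- B's loop body over one character: state (pos, filt_words, c, buf, seen)
def pvBStep (st : List Int × List String × Int × List Char × Bool) (ch : Char) :
    List Int × List String × Int × List Char × Bool :=
  if ch = ' ' then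
    if st.2.2.2.2 then
      (st.1 ++ [st.2.2.1 + 1], st.2.1 ++ [String.ofList st.2.2.2.1], st.2.2.1 + 1, [], false)
    else
      (st.1 ++ [st.2.2.1], st.2.1, st.2.2.1, [], false)
  else
    (st.1 ++ [st.2.2.1], st.2.1, st.2.2.1, st.2.2.2.1 ++ [ch],
      st.2.2.2.2 || !PySem.Chars.isspace ch)

-- port of B: the char loop, then the final flush of the last word
def word_to_pos_alt (text : String) : List Int × List String :=
  let st := text.toList.foldl pvBStep ([], [], 0, [], false)
  let filt := if st.2.2.2.2 then st.2.1 ++ [String.ofList st.2.2.2.1] else st.2.1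
  (st.1, filt)

-- ===== PRECONDITION & SPEC =====
def Spec_word_to_pos (text : String) (out : List Int × List String) : Prop := out = word_to_pos_alt text
instance (text : String) (out : List Int × List String) : Decidable (Spec_word_to_pos text out) := by unfold Spec_word_to_pos; infer_instance

-- ===== CLAIM (what is proved, stated in full; the proofs are below) =====
def Claim_equal_word_to_pos : Prop := ∀ (text : String), Dom_word_to_pos text → Spec_word_to_pos text (word_to_pos text)

-- ===== LEMMAS AND PROOFS =====

-- char-level flag of a word: 1 iff it contains a non-whitespace character
def pvFlagC (l : List Char) : Int := if l.any (fun ch => !PySem.Chars.isspace ch) then 1 else 0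

-- splitting a char list on ' ': (first word, remaining words)
def pvSplitSp : List Char → List Char × List (List Char)
  | [] => ([], [])
  | ch :: rest =>
    if ch = ' ' then ([], (pvSplitSp rest).1 :: (pvSplitSp rest).2)
    else (ch :: (pvSplitSp rest).1, (pvSplitSp rest).2)

-- the common value of pos on the tail words (each word: len+1 copies of the exclusive count)
def pvPosSpec : List (List Char) → Int → List Int
  | [], _ => []
  | w :: ws, c => List.replicate (w.length + 1) c ++ pvPosSpec ws (c + pvFlagC w)

def pvFiltSpec (ws : List (List Char)) : List String :=
  (ws.filter (fun w => w.any (fun ch => !PySem.Chars.isspace ch))).map String.ofList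

def pvCnt (ws : List (List Char)) : Int := ((ws.map pvFlagC)).sum

-- ---- A side ----

theorem pv_str_flag (w : List Char) :
    (PySem.Str.len (PySem.Str.strip (String.ofList w)) ≠ 0) ↔ (w.any (fun ch => !PySem.Chars.isspace ch) = true) := by
  have h : (PySem.Str.strip (String.ofList w)).toList = PySem.Chars.strip w := by
    simp [PySem.Str.toList_strip]
  constructor
  · intro hne
    by_contra hs
    have hall : ∀ x ∈ w, PySem.Chars.isspace x = true := by
      intro x hx
      by_contra hxx
      exact hs (List.any_eq_true.mpr ⟨x, hx, by simp [hxx]⟩)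
    have hl : PySem.Chars.lstrip w = [] := by
      simp [PySem.Chars.lstrip, List.dropWhile_eq_nil_iff]
      intro x hx; exact hall x hx
    have : PySem.Chars.strip w = [] := by simp [PySem.Chars.strip, hl, PySem.Chars.rstrip]
    apply hne
    simp [PySem.Str.len, h, this]
  · intro hany hzero
    have h0 : PySem.Chars.strip w = [] := by
      have := hzero
      simp [PySem.Str.len, h] at this
      exact this
    obtain ⟨x, hx, hxx⟩ := List.any_eq_true.mp hany
    have hns : ¬ PySem.Chars.isspace x = true := by simpa using hxx
    -- x survives lstrip, and then rstrip keeps a nonempty list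
    have hl : PySem.Chars.lstrip w ≠ [] := by
      simp only [PySem.Chars.lstrip]
      intro he
      rw [List.dropWhile_eq_nil_iff] at he
      exact hns (he x hx)
    -- lstrip w starts with a non-space char, so rstrip cannot empty it
    have : PySem.Chars.strip w ≠ [] := by
      simp only [PySem.Chars.strip, PySem.Chars.rstrip, PySem.Chars.lstrip] at h0 ⊢
      intro he
      rw [List.reverse_eq_nil_iff, List.dropWhile_eq_nil_iff] at he
      -- every char of (dropWhile isspace w).reverse is a space; but dropWhile's head is not
      cases hd : List.dropWhile PySem.Chars.isspace w with
      | nil => exact hl (by simpa [PySem.Chars.lstrip] using hd)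
      | cons y ys =>
        have hy : ¬ PySem.Chars.isspace y = true := by
          have := List.head?_dropWhile_not PySem.Chars.isspace w
          rw [hd] at this
          simpa using this
        exact hy (he y (by simp [hd]))
    exact this h0

-- A's inner char loop appends |range| copies of c
theorem pv_inner (l : List Int) (p : List Int) (c : Int) :
    l.foldl (fun p _ => p ++ [c]) p = p ++ List.replicate l.length c := by
  induction l generalizing p with
  | nil => simp
  | cons x xs ih => simp [List.foldl_cons, ih, List.replicate_succ]

theorem pv_aStep_eq (pos : List Int) (filt : List String) (c : Int) (i : Int) (w : List Char) :
    pvAStep (pos, filt, c) (i, String.ofList w) =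
      (pos ++ List.replicate w.length c ++ (if i ≠ 0 then [c] else []),
       filt ++ (if w.any (fun ch => !PySem.Chars.isspace ch) then [String.ofList w] else []),
       c + pvFlagC w) := by
  unfold pvAStep
  simp only []
  rw [pv_inner, PySem.List.length_pyRange_one]
  have hlen : (PySem.Str.len (String.ofList w)).toNat = w.length := by
    simp [PySem.Str.len]
  by_cases hw : w.any (fun ch => !PySem.Chars.isspace ch) = true
  · rw [if_pos ((pv_str_flag w).mpr hw)]
    have : pvFlagC w = 1 := by simp [pvFlagC, hw]
    by_cases hi : i ≠ 0 <;> simp [hi, hw, this]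
  · rw [if_neg (fun hc => hw ((pv_str_flag w).mp hc))]
    have : pvFlagC w = 0 := by simp [pvFlagC, hw]
    by_cases hi : i ≠ 0 <;> simp [hi, hw, this]

-- A's main loop on the tail words (all indices ≥ 1)
theorem pv_a_main (ws : List (List Char)) (s : Int) (hs : 1 ≤ s) (pos : List Int)
    (filt : List String) (c : Int) :
    (PySem.List.enumerate (ws.map String.ofList) s).foldl pvAStep (pos, filt, c) =
      (pos ++ pvPosSpec ws c, filt ++ pvFiltSpec ws, c + pvCnt ws) := by
  induction ws generalizing s pos filt c with
  | nil => simp [PySem.List.enumerate_nil, pvPosSpec, pvFiltSpec, pvCnt]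
  | cons w t ih =>
    rw [List.map_cons, PySem.List.enumerate_cons, List.foldl_cons, pv_aStep_eq,
      ih (s+1) (by omega)]
    have hs0 : s ≠ 0 := by omega
    refine Prod.ext ?_ (Prod.ext ?_ ?_)
    · simp [pvPosSpec, hs0, List.replicate_succ', List.append_assoc]
    · simp only [pvFiltSpec, List.filter_cons]
      by_cases hw : w.any (fun ch => !PySem.Chars.isspace ch) = true <;>
        simp [hw, List.append_assoc]
    · simp only [pvCnt, List.map_cons, List.sum_cons]
      ring

-- ---- splitOn on a single space equals pvSplitSp ----

theorem pv_go_eq (fuel : Nat) (l cur : List Char) (acc : List (List Char)) (h : l.length ≤ fuel) :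
    PySem.Chars.splitOn.go [' '] fuel l cur acc =
      acc.reverse ++ ((cur.reverse ++ (pvSplitSp l).1) :: (pvSplitSp l).2) := by
  induction fuel generalizing l cur acc with
  | zero =>
    have : l = [] := List.length_eq_zero_iff.mp (Nat.le_zero.mp h)
    subst this
    simp [PySem.Chars.splitOn.go, pvSplitSp]
  | succ fuel ih =>
    cases l with
    | nil => simp [PySem.Chars.splitOn.go, pvSplitSp]
    | cons ch rest =>
      rw [PySem.Chars.splitOn.go]
      by_cases hch : ch = ' '
      · subst hch
        have hpre : [' '].isPrefixOf (' ' :: rest) = true := by simp [List.isPrefixOf]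
        rw [if_pos hpre]
        simp only [List.length_singleton, List.drop_one, List.tail_cons]
        rw [ih rest [] ((cur.reverse) :: acc) (by simpa using Nat.le_of_succ_le_succ h)]
        simp [pvSplitSp]
      · have hpre : [' '].isPrefixOf (ch :: rest) = false := by
          simp [List.isPrefixOf]
          exact fun he => hch he.symm
        rw [if_neg (by simp [hpre])]
        rw [ih rest (ch :: cur) acc (by simpa using Nat.le_of_succ_le_succ h)]
        simp [pvSplitSp, hch]

theorem pv_splitOn_eq (cs : List Char) :
    PySem.Chars.splitOn cs [' '] = (pvSplitSp cs).1 :: (pvSplitSp cs).2 := by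
  unfold PySem.Chars.splitOn
  rw [pv_go_eq cs.length.succ cs [] [] (by omega)]
  simp

-- ---- B side ----

-- pos produced by the char scan from counter c and flag seen
def pvBPos : List Char → Int → Bool → List Int
  | [], _, _ => []
  | ch :: rest, c, seen =>
    if ch = ' ' then
      (if seen then (c+1) :: pvBPos rest (c+1) false else c :: pvBPos rest c false)
    else c :: pvBPos rest c (seen || !PySem.Chars.isspace ch)

-- filt_words produced by the char scan (including the final flush) from buffer buf and flag seen
def pvBFilt : List Char → List Char → Bool → List String
  | [], buf, seen => if seen then [String.ofList buf] else []
  | ch :: rest, buf, seen =>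
    if ch = ' ' then
      (if seen then String.ofList buf :: pvBFilt rest [] false else pvBFilt rest [] false)
    else pvBFilt rest (buf ++ [ch]) (seen || !PySem.Chars.isspace ch)

theorem pvSplitSp_space (rest : List Char) :
    pvSplitSp (' ' :: rest) = ([], (pvSplitSp rest).1 :: (pvSplitSp rest).2) := by
  simp [pvSplitSp]

theorem pvSplitSp_char (ch : Char) (rest : List Char) (h : ch ≠ ' ') :
    pvSplitSp (ch :: rest) = (ch :: (pvSplitSp rest).1, (pvSplitSp rest).2) := by
  simp [pvSplitSp, h]

theorem pvBPos_space (rest : List Char) (c : Int) (seen : Bool) :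
    pvBPos (' ' :: rest) c seen =
      (if seen then (c+1) :: pvBPos rest (c+1) false else c :: pvBPos rest c false) := by
  simp [pvBPos]

theorem pvBPos_char (ch : Char) (rest : List Char) (c : Int) (seen : Bool) (h : ch ≠ ' ') :
    pvBPos (ch :: rest) c seen = c :: pvBPos rest c (seen || !PySem.Chars.isspace ch) := by
  simp [pvBPos, h]

theorem pvBFilt_space (rest : List Char) (buf : List Char) (seen : Bool) :
    pvBFilt (' ' :: rest) buf seen =
      (if seen then String.ofList buf :: pvBFilt rest [] false else pvBFilt rest [] false) := by
  simp [pvBFilt]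

theorem pvBFilt_char (ch : Char) (rest : List Char) (buf : List Char) (seen : Bool) (h : ch ≠ ' ') :
    pvBFilt (ch :: rest) buf seen =
      pvBFilt rest (buf ++ [ch]) (seen || !PySem.Chars.isspace ch) := by
  simp [pvBFilt, h]

theorem pv_b_fold (cs : List Char) (pos : List Int) (filt : List String) (c : Int)
    (buf : List Char) (seen : Bool) :
    (cs.foldl pvBStep (pos, filt, c, buf, seen)).1 = pos ++ pvBPos cs c seen ∧
    (if (cs.foldl pvBStep (pos, filt, c, buf, seen)).2.2.2.2 then
        (cs.foldl pvBStep (pos, filt, c, buf, seen)).2.1 ++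
          [String.ofList (cs.foldl pvBStep (pos, filt, c, buf, seen)).2.2.2.1]
      else (cs.foldl pvBStep (pos, filt, c, buf, seen)).2.1)
      = filt ++ pvBFilt cs buf seen := by
  induction cs generalizing pos filt c buf seen with
  | nil =>
    constructor
    · simp [pvBPos]
    · cases seen <;> simp [pvBFilt]
  | cons ch rest ih =>
    simp only [List.foldl_cons]
    by_cases hch : ch = ' '
    · subst hch
      cases seen with
      | false =>
        have hstep : pvBStep (pos, filt, c, buf, false) ' ' = (pos ++ [c], filt, c, [], false) := by
          simp [pvBStep]
        rw [hstep]
        obtain ⟨h1, h2⟩ := ih (pos ++ [c]) filt c [] false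
        exact ⟨by rw [h1]; simp [pvBPos], by rw [h2]; simp [pvBFilt]⟩
      | true =>
        have hstep : pvBStep (pos, filt, c, buf, true) ' ' =
            (pos ++ [c+1], filt ++ [String.ofList buf], c+1, [], false) := by
          simp [pvBStep]
        rw [hstep]
        obtain ⟨h1, h2⟩ := ih (pos ++ [c+1]) (filt ++ [String.ofList buf]) (c+1) [] false
        exact ⟨by rw [h1]; simp [pvBPos], by rw [h2]; simp [pvBFilt]⟩
    · have hstep : pvBStep (pos, filt, c, buf, seen) ch =
          (pos ++ [c], filt, c, buf ++ [ch], seen || !PySem.Chars.isspace ch) := by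
        simp [pvBStep, hch]
      rw [hstep]
      obtain ⟨h1, h2⟩ := ih (pos ++ [c]) filt c (buf ++ [ch]) (seen || !PySem.Chars.isspace ch)
      exact ⟨by rw [h1]; simp [pvBPos, hch], by rw [h2]; simp [pvBFilt, hch]⟩

-- bridge: the char-scan specs, started with flag = "buf has a non-space char", equal the
-- word-level specs over the split of the remaining text
theorem pv_b_bridge (cs : List Char) (c : Int) (buf : List Char) :
    pvBPos cs c (buf.any (fun ch => !PySem.Chars.isspace ch)) =
      List.replicate (pvSplitSp cs).1.length c ++
        pvPosSpec (pvSplitSp cs).2 (c + pvFlagC (buf ++ (pvSplitSp cs).1)) ∧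
    pvBFilt cs buf (buf.any (fun ch => !PySem.Chars.isspace ch)) =
      (if (buf ++ (pvSplitSp cs).1).any (fun ch => !PySem.Chars.isspace ch) then
          [String.ofList (buf ++ (pvSplitSp cs).1)] else []) ++ pvFiltSpec (pvSplitSp cs).2 := by
  induction cs generalizing c buf with
  | nil =>
    constructor
    · simp [pvBPos, pvSplitSp, pvPosSpec]
    · simp [pvBFilt, pvSplitSp, pvFiltSpec, List.any_eq_true]
  | cons ch rest ih =>
    by_cases hch : ch = ' '
    · subst hch
      rw [pvSplitSp_space]
      cases hb : buf.any (fun ch => !PySem.Chars.isspace ch) with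
      | false =>
        have hf : pvFlagC buf = 0 := by simp [pvFlagC, hb]
        obtain ⟨h1, h2⟩ := ih c []
        simp only [List.any_nil, List.nil_append] at h1 h2
        constructor
        · rw [pvBPos_space, if_neg Bool.false_ne_true, h1]
          simp [pvPosSpec, hf, List.replicate_succ]
        · rw [pvBFilt_space, if_neg Bool.false_ne_true, h2]
          simp only [List.append_nil, pvFiltSpec, List.filter_cons]
          by_cases hw : ((pvSplitSp rest).1.any fun ch => !PySem.Chars.isspace ch) = true
          · rw [if_pos hw, if_pos hw, if_neg (by simp [hb])]
            simp
          · rw [if_neg hw, if_neg hw, if_neg (by simp [hb])]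
      | true =>
        have hf : pvFlagC buf = 1 := by simp [pvFlagC, hb]
        obtain ⟨h1, h2⟩ := ih (c + 1) []
        simp only [List.any_nil, List.nil_append] at h1 h2
        constructor
        · rw [pvBPos_space, if_pos rfl, h1]
          simp [pvPosSpec, hf, List.replicate_succ]
        · rw [pvBFilt_space, if_pos rfl, h2]
          simp only [List.append_nil, pvFiltSpec, List.filter_cons]
          by_cases hw : ((pvSplitSp rest).1.any fun ch => !PySem.Chars.isspace ch) = true
          · rw [if_pos hw, if_pos hw, if_pos (by simp [hb])]
            simp
          · rw [if_neg hw, if_neg hw, if_pos (by simp [hb])]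
            simp
    · rw [pvSplitSp_char ch rest hch]
      obtain ⟨h1, h2⟩ := ih c (buf ++ [ch])
      have hseen : (buf ++ [ch]).any (fun ch => !PySem.Chars.isspace ch)
          = (buf.any (fun ch => !PySem.Chars.isspace ch) || !PySem.Chars.isspace ch) := by
        simp [List.any_append]
      have happ : (buf ++ [ch]) ++ (pvSplitSp rest).1 = buf ++ (ch :: (pvSplitSp rest).1) := by
        simp
      rw [hseen, happ] at h1 h2
      constructor
      · rw [pvBPos_char ch rest c _ hch, h1]
        simp [List.replicate_succ]
      · rw [pvBFilt_char ch rest buf _ hch, h2]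

-- ===== VERDICT (by name: the statement is the Claim_ definition above) =====
theorem word_to_pos_spec : Claim_equal_word_to_pos := by
  intro text _
  unfold Spec_word_to_pos
  obtain ⟨hb1, hb2⟩ := pv_b_fold text.toList [] [] 0 [] false
  obtain ⟨hc1, hc2⟩ := pv_b_bridge text.toList 0 []
  simp only [List.any_nil, List.nil_append] at hc1 hc2 hb1 hb2
  have hB : word_to_pos_alt text = (pvBPos text.toList 0 false, pvBFilt text.toList [] false) := by
    unfold word_to_pos_alt
    exact Prod.ext hb1 hb2
  rw [hB, hc1, hc2]
  unfold word_to_pos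
  have hsplit : (PySem.Str.split? text " ").getD [] =
      ((pvSplitSp text.toList).1 :: (pvSplitSp text.toList).2).map String.ofList := by
    simp only [PySem.Str.split?, PySem.Chars.split?]
    rw [if_neg (by simp)]
    simp [pv_splitOn_eq]
  rw [hsplit]
  simp only [List.map_cons, PySem.List.enumerate_cons, List.foldl_cons]
  rw [pv_aStep_eq]
  rw [if_neg (by omega)]
  rw [pv_a_main (pvSplitSp text.toList).2 (0+1) (by omega)]
  refine Prod.ext ?_ ?_
  · simp only [List.nil_append, List.append_assoc]
  · simp only [List.nil_append]
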